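-- pv_equiv track=rewrite | github.com/bhagya-d36/laptop-data-intelligence | backend/services/llm_service.py | _find_relevant_laptops
-- ===== SOURCE A (Python) =====
-- from typing import Dict, List, Any, Optional
--
-- def _find_relevant_laptops(user_query: str, laptops: List[Dict]) -> List[Dict]:
--     """Find laptops relevant to the user query"""
--     query_lower = user_query.lower()
--     relevant_laptops = []
--
--     for laptop in laptops:
--         brand = laptop.get('Brand', '').lower()
--         model = laptop.get('Model', '').lower()
--
--         # Check if brand and model are mentioned in the query
--         if brand in query_lower and any(word in query_lower for word in model.split()):
--             relevant_laptops.append(laptop)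
--
--     # Remove duplicates while preserving order
--     seen = set()
--     unique_laptops = []
--     for laptop in relevant_laptops:
--         laptop_id = f"{laptop.get('Brand', '')} {laptop.get('Model', '')}"
--         if laptop_id not in seen:
--             seen.add(laptop_id)
--             unique_laptops.append(laptop)
--
--     return unique_laptops
-- ===== SOURCE B (Python) =====
-- def _find_relevant_laptops(user_query, laptops):
--     """Stateless characterization: keep a laptop iff it matches the query and it is
--     the first matching occurrence of its 'Brand Model' key (checked against the
--     prefix of the list), instead of filtering then deduplicating with a seen set."""
--     q = user_query.lower()
--
--     def matches(lap):
--         brand = lap.get('Brand', '').lower()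
--         model = lap.get('Model', '').lower()
--         return brand in q and any(w in q for w in model.split())
--
--     def key(lap):
--         return f"{lap.get('Brand', '')} {lap.get('Model', '')}"
--
--     return [lap for i, lap in enumerate(laptops)
--             if matches(lap)
--             and not any(matches(p) and key(p) == key(lap) for p in laptops[:i])]
-- ===== Notes on version B (the rewrite author's own statement) =====
-- stated objective: alternative
-- what changed: B replaces A's two stateful passes (filter into an intermediate list, then dedup via a mutated seen set) with a stateless comprehension that keeps a laptop iff it matches and no earlier laptop in the list both matches and has the same 'Brand Model' key; no intermediate list and no seen set are maintained.
import Mathlib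
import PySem

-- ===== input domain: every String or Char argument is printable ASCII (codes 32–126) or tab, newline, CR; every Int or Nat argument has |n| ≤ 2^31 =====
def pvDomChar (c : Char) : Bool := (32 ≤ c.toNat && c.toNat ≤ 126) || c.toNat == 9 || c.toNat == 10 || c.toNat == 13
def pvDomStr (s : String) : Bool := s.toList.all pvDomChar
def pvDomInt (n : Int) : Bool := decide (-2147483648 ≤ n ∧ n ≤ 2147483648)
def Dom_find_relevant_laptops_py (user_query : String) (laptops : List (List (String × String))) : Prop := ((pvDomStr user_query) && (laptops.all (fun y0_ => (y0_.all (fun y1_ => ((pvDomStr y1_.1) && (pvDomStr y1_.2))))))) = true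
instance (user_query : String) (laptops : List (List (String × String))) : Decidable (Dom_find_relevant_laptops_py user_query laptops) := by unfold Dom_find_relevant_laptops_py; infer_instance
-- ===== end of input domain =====

-- B replaces A's filter + seen-set dedup with a stateless comprehension keeping a laptop
-- iff it matches and no earlier matching laptop shares its key; objective: alternative.

-- ===== PORT A =====
-- 'brand in query_lower and any(word in query_lower for word in model.split())'
def pvMatches (query_lower : String) (laptop : List (String × String)) : Bool :=
  let brand := PySem.Str.lower (PySem.Dict.getD (PySem.Dict.mk laptop) "Brand" "")
  let model := PySem.Str.lower (PySem.Dict.getD (PySem.Dict.mk laptop) "Model" "")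
  PySem.Str.isIn brand query_lower &&
    (PySem.Str.split₀ model).any (fun word => PySem.Str.isIn word query_lower)

-- f"{laptop.get('Brand', '')} {laptop.get('Model', '')}"
def pvLaptopId (laptop : List (String × String)) : String :=
  PySem.Str.join " " [PySem.Dict.getD (PySem.Dict.mk laptop) "Brand" "", PySem.Dict.getD (PySem.Dict.mk laptop) "Model" ""]

-- body of A's second loop
def pvDedupStep (st : PySem.Set String × List (List (String × String)))
    (laptop : List (String × String)) :
    PySem.Set String × List (List (String × String)) :=
  let laptop_id := pvLaptopId laptop
  if PySem.Set.contains st.1 laptop_id then st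
  else (PySem.Set.add st.1 laptop_id, st.2 ++ [laptop])

def find_relevant_laptops_py (user_query : String) (laptops : List (List (String × String))) : List (List (String × String)) :=
  let query_lower := PySem.Str.lower user_query
  -- first loop: build relevant_laptops
  let relevant_laptops := laptops.foldl
    (fun acc laptop => if pvMatches query_lower laptop then acc ++ [laptop] else acc) []
  -- second loop: remove duplicates while preserving order
  let fin := relevant_laptops.foldl pvDedupStep (PySem.Set.empty, [])
  fin.2

-- ===== PORT B =====
-- B's helper 'matches(lap)'
def pvMatchesB (q : String) (laptop : List (String × String)) : Bool :=
  let brand := PySem.Str.lower (PySem.Dict.getD (PySem.Dict.mk laptop) "Brand" "")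
  let model := PySem.Str.lower (PySem.Dict.getD (PySem.Dict.mk laptop) "Model" "")
  PySem.Str.isIn brand q &&
    (PySem.Str.split₀ model).any (fun word => PySem.Str.isIn word q)

-- B's helper 'key(lap)'
def pvKeyB (laptop : List (String × String)) : String :=
  PySem.Str.join " " [PySem.Dict.getD (PySem.Dict.mk laptop) "Brand" "", PySem.Dict.getD (PySem.Dict.mk laptop) "Model" ""]

-- the comprehension over enumerate(laptops); laptops[:i] with i = index ≥ 0 is 'take i'
def find_relevant_laptops_py_alt (user_query : String) (laptops : List (List (String × String))) : List (List (String × String)) :=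
  let q := PySem.Str.lower user_query
  ((PySem.List.enumerate laptops 0).filter (fun il =>
      pvMatchesB q il.2 &&
        !((laptops.take il.1.toNat).any (fun p => pvMatchesB q p && (pvKeyB p == pvKeyB il.2))))).map (·.2)

-- ===== PRECONDITION & SPEC =====
def Spec_find_relevant_laptops_py (user_query : String) (laptops : List (List (String × String))) (out : List (List (String × String))) : Prop := out = find_relevant_laptops_py_alt user_query laptops
instance (user_query : String) (laptops : List (List (String × String))) (out : List (List (String × String))) : Decidable (Spec_find_relevant_laptops_py user_query laptops out) := by unfold Spec_find_relevant_laptops_py; infer_instance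

-- ===== CLAIM (what is proved, stated in full; the proofs are below) =====
def Claim_equal_find_relevant_laptops_py : Prop := ∀ (user_query : String) (laptops : List (List (String × String))), Dom_find_relevant_laptops_py user_query laptops → Spec_find_relevant_laptops_py user_query laptops (find_relevant_laptops_py user_query laptops)

-- ===== LEMMAS AND PROOFS =====

theorem pvMatchesB_eq (q : String) (x : List (String × String)) : pvMatchesB q x = pvMatches q x := rfl
theorem pvKeyB_eq (x : List (String × String)) : pvKeyB x = pvLaptopId x := rfl

-- B's comprehension body, as a function of the list (q fixed)
def pvBcore (q : String) (laptops : List (List (String × String))) : List (List (String × String)) :=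
  ((PySem.List.enumerate laptops 0).filter (fun il =>
      pvMatchesB q il.2 &&
        !((laptops.take il.1.toNat).any (fun p => pvMatchesB q p && (pvKeyB p == pvKeyB il.2))))).map (·.2)

-- snoc step for B's comprehension
theorem pvBcore_append (q : String) (l : List (List (String × String))) (x : List (String × String)) :
    pvBcore q (l ++ [x]) =
      pvBcore q l ++
        (if pvMatchesB q x && !(l.any (fun p => pvMatchesB q p && (pvKeyB p == pvKeyB x))) then [x] else []) := by
  unfold pvBcore
  rw [PySem.List.enumerate_append, List.filter_append, List.map_append]
  congr 1
  · congr 1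
    apply List.filter_congr
    intro il hil
    rcases (PySem.List.mem_enumerate_iff l 0 il).1 hil with ⟨k, hk, rfl⟩
    simp only [zero_add, Int.toNat_natCast]
    rw [List.take_append_of_le_length (le_of_lt hk)]
  · simp only [PySem.List.enumerate, List.filter]
    have : ((0 : Int) + (l.length : Int)).toNat = l.length := by omega
    rw [zero_add]
    simp only [Int.toNat_natCast, List.take_left']
    split <;> simp_all

-- seen-set membership = plain list membership of the key list
theorem contains_ofList_map (K : List String) (k : String) :
    List.contains (PySem.Set.ofList K) k = K.contains k := by
  simp only [List.contains_eq_mem]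
  exact decide_eq_decide.mpr (PySem.Set.mem_ofList K k)

theorem ofList_append_singleton (K : List String) (k : String) :
    PySem.Set.ofList (K ++ [k]) = PySem.Set.add (PySem.Set.ofList K) k := by
  rw [PySem.Set.ofList_eq_foldl, PySem.Set.ofList_eq_foldl, List.foldl_append]
  rfl

-- 'some earlier matching laptop has key of x' = 'key of x is among the keys of the matching prefix'
theorem any_key_contains (q : String) (l : List (List (String × String))) (x : List (String × String)) :
    (l.any fun p => pvMatches q p && (pvLaptopId p == pvLaptopId x)) =
      ((l.filter (pvMatches q)).map pvLaptopId).contains (pvLaptopId x) := by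
  induction l with
  | nil => rfl
  | cons a l ih =>
    simp only [List.any_cons, List.filter_cons]
    by_cases hma : pvMatches q a
    · rw [if_pos hma]
      simp only [List.map_cons, List.contains_cons, ih, hma, Bool.true_and]
      have hcomm : (pvLaptopId a == pvLaptopId x) = (pvLaptopId x == pvLaptopId a) := by
        simp [BEq.comm]
      rw [hcomm]
    · rw [if_neg hma]; simp [hma, ih]

-- main invariant: A's dedup fold over the matching elements of l produces
-- (keys emitted so far as a set, B's comprehension over l)
theorem pvMain (q : String) (l : List (List (String × String))) :
    (l.filter (pvMatches q)).foldl pvDedupStep (PySem.Set.empty, []) =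
      (PySem.Set.ofList (((l.filter (pvMatches q))).map pvLaptopId), pvBcore q l) := by
  induction l using List.reverseRecOn with
  | nil => rfl
  | append_singleton l x ih =>
    rw [List.filter_append, pvBcore_append]
    by_cases hm : pvMatches q x
    · simp only [List.filter_cons, List.filter_nil, hm, if_pos, List.foldl_append, ih,
        List.map_append, List.map_cons, List.map_nil, List.foldl_cons, List.foldl_nil]
      rw [ofList_append_singleton]
      rcases Bool.eq_false_or_eq_true
          (((l.filter (pvMatches q)).map pvLaptopId).contains (pvLaptopId x)) with hc | hc
      · -- key of x already seen: A leaves the state unchanged, B drops x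
        have hcontains : PySem.Set.contains (PySem.Set.ofList ((l.filter (pvMatches q)).map pvLaptopId)) (pvLaptopId x) = true :=
          (contains_ofList_map _ _).trans hc
        have hcondB : (pvMatchesB q x && !(l.any fun p => pvMatchesB q p && (pvKeyB p == pvKeyB x))) = false := by
          simp only [pvMatchesB_eq, pvKeyB_eq, any_key_contains, hm, Bool.true_and, hc,
            Bool.not_true]
        simp only [pvDedupStep, PySem.Set.add, hcondB, Bool.false_eq_true, if_false,
          List.append_nil]
        rw [if_pos hcontains, if_pos hcontains]
      · -- key of x not yet seen: A appends x and records its key, B keeps x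
        have hcontains : PySem.Set.contains (PySem.Set.ofList ((l.filter (pvMatches q)).map pvLaptopId)) (pvLaptopId x) = false :=
          (contains_ofList_map _ _).trans hc
        have hcondB : (pvMatchesB q x && !(l.any fun p => pvMatchesB q p && (pvKeyB p == pvKeyB x))) = true := by
          simp only [pvMatchesB_eq, pvKeyB_eq, any_key_contains, hm, Bool.true_and, hc,
            Bool.not_false]
        have hnc : ¬ (PySem.Set.contains (PySem.Set.ofList ((l.filter (pvMatches q)).map pvLaptopId)) (pvLaptopId x) = true) :=
          fun h => Bool.noConfusion (h.symm.trans hcontains)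
        simp only [pvDedupStep, PySem.Set.add, hcondB, if_true]
        rw [if_neg hnc, if_neg hnc]
    · have hcondB : (pvMatchesB q x && !(l.any fun p => pvMatchesB q p && (pvKeyB p == pvKeyB x))) = false := by
        simp [pvMatchesB_eq, hm]
      simp only [List.filter_cons, List.filter_nil, hm, hcondB]
      simpa using ih

-- ===== VERDICT (by name: the statement is the Claim_ definition above) =====
theorem find_relevant_laptops_py_spec : Claim_equal_find_relevant_laptops_py := by
  intro user_query laptops _
  unfold Spec_find_relevant_laptops_py find_relevant_laptops_py find_relevant_laptops_py_alt
  simp only [PySem.List.foldl_append_if_eq_filter, List.nil_append]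
  rw [pvMain]
  rfl
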